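-- pv_equiv track=rewrite | github.com/Giuscar/python-exercises | exercises/flights.py | calculate_max_flights_on_air
-- ===== SOURCE A (Python) =====
-- class PriorityQueue(object):
--     def __init__(self):
--         self.queue = []
--
--     def insert(self, element):
--         self.queue.append(element)
--         sorted(self.queue, key=lambda tup: tup[1])
--
--     def get(self):
--         return self.queue[0]
--
--     def pop(self):
--         return self.queue.remove(self.queue[0])
--
--     def is_empty(self):
--         return True if len(self.queue) == 0 else False
--
--     def get_size(self):
--         return len(self.queue)
--
-- def calculate_max_flights_on_air(list_of_flights):
--     list_of_flights.sort(key=lambda tup: tup[0])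
--     max_flights = -1
--     flights_on_air = PriorityQueue()
--
--     for list_of_flight in list_of_flights:
--         if flights_on_air.is_empty():
--             flights_on_air.insert(list_of_flight)
--         else:
--             while not flights_on_air.is_empty() and list_of_flight[0] > flights_on_air.get()[1]:
--                 flights_on_air.pop()
--
--             flights_on_air.insert(list_of_flight)
--         max_flights = max(max_flights, flights_on_air.get_size())
--
--     return max_flights
-- ===== SOURCE B (Python) =====
-- def calculate_max_flights_on_air(list_of_flights):
--     list_of_flights.sort(key=lambda tup: tup[0])
--     best = 0
--     j = 0
--     for i, (start, _end) in enumerate(list_of_flights):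
--         while j < i and list_of_flights[j][1] < start:
--             j += 1
--         best = max(best, i - j + 1)
--     return best
-- ===== Notes on version B (the rewrite author's own statement) =====
-- stated objective: faster
-- what changed: Replaced the PriorityQueue object simulation (append + a discarded sorted() call on every insert, O(n) list.remove per pop) by an index-based two-pointer sliding window over the sorted list with no auxiliary container.
-- intended difference: On the empty list A returns -1 (its max accumulator's sentinel initial value) while B returns 0, the intended count of flights in the air when there are no flights. — e.g. on calculate_max_flights_on_air([]): A returns -1, B returns 0
import Mathlib
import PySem

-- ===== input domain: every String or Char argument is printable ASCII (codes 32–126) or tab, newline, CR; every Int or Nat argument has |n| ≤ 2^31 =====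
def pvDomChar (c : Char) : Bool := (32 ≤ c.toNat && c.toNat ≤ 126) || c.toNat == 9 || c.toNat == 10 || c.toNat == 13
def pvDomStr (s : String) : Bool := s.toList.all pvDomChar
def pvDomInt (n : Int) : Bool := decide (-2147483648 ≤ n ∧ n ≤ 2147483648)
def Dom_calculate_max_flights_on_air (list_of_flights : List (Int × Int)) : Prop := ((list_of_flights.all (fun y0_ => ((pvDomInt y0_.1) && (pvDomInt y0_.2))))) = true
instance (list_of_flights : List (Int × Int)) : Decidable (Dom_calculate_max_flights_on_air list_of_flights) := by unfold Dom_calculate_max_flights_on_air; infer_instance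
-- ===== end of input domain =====

-- B replaces A's PriorityQueue simulation by a two-pointer sliding window over the
-- sorted list (objective: faster). Both A and B sort their argument in place; the
-- theorems below are about the return value (the mutation is identical in A and B).

-- ===== PORT A =====
-- A's while-loop: pop the front of the queue while the new flight starts after the front's end
def pvPopLoop (start : Int) : List (Int × Int) → List (Int × Int)
  | [] => []
  | f :: rest => if start > f.2 then pvPopLoop start rest else f :: rest

-- one iteration of A's for-loop: state = (flights_on_air.queue, max_flights)
-- (PriorityQueue.insert's 'sorted(self.queue, …)' discards its result, so insert = append;
--  pop removes queue[0], i.e. drops the head)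
def pvStepA (st : List (Int × Int) × Int) (x : Int × Int) : List (Int × Int) × Int :=
  let q' := if st.1.isEmpty then st.1 ++ [x] else pvPopLoop x.1 st.1 ++ [x]
  (q', max st.2 (q'.length : Int))

def calculate_max_flights_on_air (list_of_flights : List (Int × Int)) : Int :=
  ((PySem.List.sorted list_of_flights (fun tup => tup.1)).foldl pvStepA ([], -1)).2

-- ===== PORT B =====
-- B's inner while: advance j while j < i and s[j][1] < start (j < i ≤ len s, so getD's
-- default is never read; getD makes the in-range index access total)
def pvAdvance (s : List (Int × Int)) (start : Int) (i : Int) (j : Int) : Int :=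
  if j < i ∧ (s.getD j.toNat (0, 0)).2 < start then pvAdvance s start i (j + 1) else j
termination_by (i - j).toNat
decreasing_by omega

-- one iteration of B's for-loop: state = (j, best), p = (i, (start, end))
def pvStepB (s : List (Int × Int)) (st : Int × Int) (p : Int × (Int × Int)) : Int × Int :=
  let j := pvAdvance s p.2.1 p.1 st.1
  (j, max st.2 (p.1 - j + 1))

def calculate_max_flights_on_air_alt (list_of_flights : List (Int × Int)) : Int :=
  let s := PySem.List.sorted list_of_flights (fun tup => tup.1)
  ((PySem.List.enumerate s).foldl (pvStepB s) (0, 0)).2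

-- ===== PRECONDITION & SPEC =====
-- On the empty list A returns -1 (its max accumulator's sentinel initial value) while B
-- returns 0, the intended count of flights in the air when there are no flights.
def D_calculate_max_flights_on_air (list_of_flights : List (Int × Int)) : Prop := list_of_flights = []
instance (list_of_flights : List (Int × Int)) : Decidable (D_calculate_max_flights_on_air list_of_flights) := by unfold D_calculate_max_flights_on_air; infer_instance

def Spec_calculate_max_flights_on_air (list_of_flights : List (Int × Int)) (out : Int) : Prop := ¬ D_calculate_max_flights_on_air list_of_flights → out = calculate_max_flights_on_air_alt list_of_flights
instance (list_of_flights : List (Int × Int)) (out : Int) : Decidable (Spec_calculate_max_flights_on_air list_of_flights out) := by unfold Spec_calculate_max_flights_on_air; infer_instance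

def pvDiffWitness_calculate_max_flights_on_air : (List (Int × Int)) := []
def pvDiffWitnessOut_calculate_max_flights_on_air : Int × Int := (-1, 0)

-- ===== CLAIM (what is proved, stated in full; the proofs are below) =====
def Claim_unchanged_calculate_max_flights_on_air : Prop := ∀ (list_of_flights : List (Int × Int)), Dom_calculate_max_flights_on_air list_of_flights → Spec_calculate_max_flights_on_air list_of_flights (calculate_max_flights_on_air list_of_flights)
def Claim_changed_calculate_max_flights_on_air : Prop := Dom_calculate_max_flights_on_air (pvDiffWitness_calculate_max_flights_on_air) ∧ D_calculate_max_flights_on_air (pvDiffWitness_calculate_max_flights_on_air) ∧ calculate_max_flights_on_air (pvDiffWitness_calculate_max_flights_on_air) = pvDiffWitnessOut_calculate_max_flights_on_air.1 ∧ calculate_max_flights_on_air_alt (pvDiffWitness_calculate_max_flights_on_air) = pvDiffWitnessOut_calculate_max_flights_on_air.2 ∧ pvDiffWitnessOut_calculate_max_flights_on_air.1 ≠ pvDiffWitnessOut_calculate_max_flights_on_air.2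
def Claim_exact_calculate_max_flights_on_air : Prop := ∀ (list_of_flights : List (Int × Int)), Dom_calculate_max_flights_on_air list_of_flights → D_calculate_max_flights_on_air list_of_flights → calculate_max_flights_on_air list_of_flights ≠ calculate_max_flights_on_air_alt list_of_flights

-- ===== LEMMAS AND PROOFS =====

-- A's pop-loop on the queue t.drop j equals advancing B's pointer j in the prefix t of s = t ++ r
lemma pv_adv_pop (start : Int) (t r : List (Int × Int)) :
    ∀ (d j : Nat), j ≤ t.length → t.length - j = d →
      ∃ j2 : Nat, j ≤ j2 ∧ j2 ≤ t.length ∧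
        pvAdvance (t ++ r) start (t.length : Int) (j : Int) = (j2 : Int) ∧
        pvPopLoop start (t.drop j) = t.drop j2 := by
  intro d
  induction d with
  | zero =>
      intro j hj hd
      have hjl : j = t.length := by omega
      refine ⟨j, le_refl _, by omega, ?_, by rw [hjl]; simp [pvPopLoop]⟩
      rw [pvAdvance, if_neg]; omega
  | succ d ih =>
      intro j hj hd
      have hjlt : j < t.length := by omega
      have hget : (t ++ r)[j]?.getD (0, 0) = t[j] := by
        simp [List.getElem?_append_left hjlt, List.getElem?_eq_getElem hjlt]
      have hdrop : t.drop j = t[j] :: t.drop (j + 1) := List.drop_eq_getElem_cons hjlt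
      by_cases hc : t[j].2 < start
      · obtain ⟨j2, h1, h2, h3, h4⟩ := ih (j + 1) (by omega) (by omega)
        refine ⟨j2, by omega, h2, ?_, ?_⟩
        · rw [pvAdvance, if_pos]
          · push_cast at h3 ⊢; exact h3
          · refine ⟨by omega, ?_⟩
            simpa [Int.toNat_natCast, List.getD, hget] using hc
        · rw [hdrop]; simp only [pvPopLoop]
          rw [if_pos (by omega)]
          exact h4
      · refine ⟨j, le_refl _, by omega, ?_, ?_⟩
        · rw [pvAdvance, if_neg]
          intro ⟨_, hlt⟩
          simp only [Int.toNat_natCast, List.getD, hget] at hlt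
          exact hc hlt
        · rw [hdrop]; simp only [pvPopLoop]
          rw [if_neg (by omega)]

-- main invariant: A's fold over the rest r with queue t.drop j (nonempty) matches B's
-- fold over enumerate r starting at index t.length with pointer j, for s = t ++ r
lemma pv_main : ∀ (r t : List (Int × Int)) (j : Nat) (m : Int), j < t.length →
    (r.foldl pvStepA (t.drop j, m)).2
      = ((PySem.List.enumerate r (t.length : Int)).foldl (pvStepB (t ++ r)) ((j : Int), m)).2 := by
  intro r
  induction r with
  | nil => intro t j m hj; simp [PySem.List.enumerate_nil]
  | cons x r' ih =>
      intro t j m hj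
      obtain ⟨j2, h1, h2, h3, h4⟩ := pv_adv_pop x.1 t (x :: r') (t.length - j) j (by omega) rfl
      have hq : t.drop j ≠ [] := by
        intro h
        have := List.drop_eq_nil_iff.mp h
        omega
      have hqe : (List.drop j t).isEmpty = false := by
        simpa [List.isEmpty_iff] using hq
      have hlen : (List.drop j2 t ++ [x]).length = t.length - j2 + 1 := by
        simp
      have hstepA : pvStepA (t.drop j, m) x
          = (t.drop j2 ++ [x], max m ((t.length - j2 + 1 : Nat) : Int)) := by
        simp only [pvStepA, hqe, Bool.false_eq_true, if_false, h4]
        rw [hlen]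
      have hstepB : pvStepB (t ++ x :: r') ((j : Int), m) ((t.length : Int), x)
          = ((j2 : Int), max m ((t.length : Int) - j2 + 1)) := by
        simp only [pvStepB, h3]
      have hdropapp : t.drop j2 ++ [x] = (t ++ [x]).drop j2 :=
        (List.drop_append_of_le_length h2).symm
      have hcast : ((t.length - j2 + 1 : Nat) : Int) = (t.length : Int) - j2 + 1 := by
        omega
      rw [List.foldl_cons, hstepA, hdropapp, hcast]
      rw [PySem.List.enumerate_cons, List.foldl_cons, hstepB]
      have := ih (t ++ [x]) j2 (max m ((t.length : Int) - j2 + 1))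
        (by simp only [List.length_append, List.length_cons, List.length_nil]; omega)
      simp only [List.length_append, List.length_cons, List.length_nil] at this ⊢
      rw [show t ++ x :: r' = (t ++ [x]) ++ r' by simp] at *
      convert this using 3

-- ===== VERDICT (by name: the statement is the Claim_ definition above) =====
theorem calculate_max_flights_on_air_spec : Claim_unchanged_calculate_max_flights_on_air := by
  intro l _ hD
  unfold D_calculate_max_flights_on_air at hD
  have hsne : PySem.List.sorted l (fun tup => tup.1) ≠ [] := by
    intro h; exact hD ((PySem.List.sorted_eq_nil_iff l (fun tup => tup.1) false).mp h)
  simp only [calculate_max_flights_on_air, calculate_max_flights_on_air_alt]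
  cases hx : PySem.List.sorted l (fun tup => tup.1) with
  | nil => exact absurd hx hsne
  | cons x s' =>
    have h1 : pvStepA ([], -1) x = ([x], 1) := by
      simp [pvStepA]
    have h2 : pvStepB (x :: s') (0, 0) ((0 : Int), x) = (0, 1) := by
      simp only [pvStepB]
      rw [pvAdvance, if_neg (by intro h; exact absurd h.1 (lt_irrefl 0))]
      norm_num
    rw [List.foldl_cons, h1, PySem.List.enumerate_cons, List.foldl_cons, h2]
    have := pv_main s' [x] 0 1 (by simp)
    simpa using this

theorem calculate_max_flights_on_air_changed : Claim_changed_calculate_max_flights_on_air := by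
  unfold Claim_changed_calculate_max_flights_on_air; decide

theorem calculate_max_flights_on_air_tight : Claim_exact_calculate_max_flights_on_air := by
  intro l _ hD
  subst hD; decide
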